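-- pv_equiv track=rewrite | github.com/hannankhan888/SimpleDigitalAssistant | Actions/equations.py | preprocessed
-- ===== SOURCE A (Python) =====
-- operators = {'plus': '+', 'minus': '-', 'addition': '+', 'times': '*', 'multiplied': '*', 'divide': '/',
--              'divided': '/'}
--
-- def list_to_hyphen_string(s):
--     # initialize an empty string
--     str1 = ""
--
--     # traverse in the string
--     for index, ele in enumerate(s):
--         if len(s) - 1 != index:
--             str1 = str1 + ele + "-"
--         else:
--             str1 += ele
--         # return string
--     return str1
--
-- def preprocessed(input_equation):
--     # find operators
--     # go from left to right putting hyphens on numbers only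
--     # use a for loop
--     equation_list = input_equation.split()
--     start_index = 0
--     processed_equation = ""
--     for index, number in enumerate(equation_list):
--         if number in operators.keys():
--             left_side = equation_list[start_index:index]
--             start_index = index + 1
--             processed_equation += list_to_hyphen_string(left_side) + " " + number + " "
--         elif len(equation_list) == index + 1:
--             last_number = equation_list[start_index:]
--             processed_equation += list_to_hyphen_string(last_number)
--     return processed_equation
-- ===== SOURCE B (Python) =====
-- operators = {'plus': '+', 'minus': '-', 'addition': '+', 'times': '*', 'multiplied': '*', 'divide': '/',
--              'divided': '/'}
--
-- def preprocessed(input_equation):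
--     pieces = []
--     group = []
--     for tok in input_equation.split():
--         if tok in operators:
--             pieces.append("-".join(group) + " " + tok + " ")
--             group = []
--         else:
--             group.append(tok)
--     pieces.append("-".join(group))
--     return "".join(pieces)
-- ===== Notes on version B (the rewrite author's own statement) =====
-- stated objective: simpler
-- what changed: Replaces A's start_index pointer, list slicing and the index-counting hyphen helper by a single pass that accumulates pending number-words in a list, joining each group with hyphens at every operator and once after the loop.
import Mathlib
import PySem

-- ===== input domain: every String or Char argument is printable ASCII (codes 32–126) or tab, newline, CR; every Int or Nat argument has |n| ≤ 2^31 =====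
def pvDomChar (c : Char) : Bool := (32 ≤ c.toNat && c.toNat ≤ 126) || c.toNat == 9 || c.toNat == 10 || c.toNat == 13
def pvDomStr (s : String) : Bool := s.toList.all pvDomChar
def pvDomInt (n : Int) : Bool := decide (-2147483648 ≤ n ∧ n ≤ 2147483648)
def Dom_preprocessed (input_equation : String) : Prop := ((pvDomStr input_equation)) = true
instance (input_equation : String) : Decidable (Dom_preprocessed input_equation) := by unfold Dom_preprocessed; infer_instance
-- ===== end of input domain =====

-- B replaces A's start_index/slice bookkeeping by a single pass with a pending-group
-- accumulator and a final join — simpler, same results (and same spacing quirks).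

-- ===== PORT A =====
-- module constant: operators = {'plus': '+', …}
def operators : PySem.Dict String String :=
  PySem.Dict.ofList [("plus", "+"), ("minus", "-"), ("addition", "+"), ("times", "*"),
                     ("multiplied", "*"), ("divide", "/"), ("divided", "/")]

def list_to_hyphen_string (s : List String) : String :=
  (PySem.List.enumerate s 0).foldl
    (fun str1 p => if ((s.length : Int) - 1 ≠ p.1) then str1 ++ p.2 ++ "-" else str1 ++ p.2) ""

-- the body of A's for loop, over state (start_index, processed_equation)
def stepA (L : List String) (st : Int × String) (p : Int × String) : Int × String :=
  if (PySem.Dict.keys operators).contains p.2 then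
    (p.1 + 1, st.2 ++ list_to_hyphen_string (PySem.List.slice L (some st.1) (some p.1)) ++ " " ++ p.2 ++ " ")
  else if (L.length : Int) = p.1 + 1 then
    (st.1, st.2 ++ list_to_hyphen_string (PySem.List.slice L (some st.1) none))
  else st

def preprocessed (input_equation : String) : String :=
  let equation_list := PySem.Str.split₀ input_equation
  ((PySem.List.enumerate equation_list 0).foldl (stepA equation_list) (0, "")).2

-- ===== PORT B =====
-- the body of B's for loop, over state (pieces, group)
def stepB (st : List String × List String) (tok : String) : List String × List String :=
  if (PySem.Dict.keys operators).contains tok then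
    (st.1 ++ [PySem.Str.join "-" st.2 ++ " " ++ tok ++ " "], [])
  else (st.1, st.2 ++ [tok])

def preprocessed_alt (input_equation : String) : String :=
  let st := (PySem.Str.split₀ input_equation).foldl stepB ([], [])
  PySem.Str.join "" (st.1 ++ [PySem.Str.join "-" st.2])

-- ===== PRECONDITION & SPEC =====
def Spec_preprocessed (input_equation : String) (out : String) : Prop := out = preprocessed_alt input_equation
instance (input_equation : String) (out : String) : Decidable (Spec_preprocessed input_equation out) := by unfold Spec_preprocessed; infer_instance

-- ===== CLAIM (what is proved, stated in full; the proofs are below) =====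
def Claim_equal_preprocessed : Prop := ∀ (input_equation : String), Dom_preprocessed input_equation → Spec_preprocessed input_equation (preprocessed input_equation)

-- ===== LEMMAS AND PROOFS =====

-- common recursive description of both loops
def Core (ts : List String) (g : List String) : String :=
  match ts with
  | [] => PySem.Str.join "-" g
  | t :: rest =>
    if (PySem.Dict.keys operators).contains t then
      PySem.Str.join "-" g ++ " " ++ t ++ " " ++ Core rest []
    else Core rest (g ++ [t])

theorem join_single (sep : String) (x : String) : PySem.Str.join sep [x] = x := by
  have : (PySem.Str.join sep [x]).toList = x.toList := by
    simp [PySem.Str.toList_join, PySem.Chars.join_singleton]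
  calc PySem.Str.join sep [x] = String.ofList (PySem.Str.join sep [x]).toList := by
        rw [String.ofList_toList]
    _ = x := by rw [this, String.ofList_toList]

theorem join_cons (sep : String) (x y : String) (r : List String) :
    PySem.Str.join sep (x :: y :: r) = x ++ sep ++ PySem.Str.join sep (y :: r) := by
  apply String.toList_inj.mp
  simp [PySem.Str.toList_join, PySem.Chars.join_cons_cons, String.toList_append]

theorem join_empty (sep : String) : PySem.Str.join sep [] = "" := by
  apply String.toList_inj.mp
  simp [PySem.Str.toList_join, PySem.Chars.join_nil]

theorem join0_cons (x : String) (xs : List String) :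
    PySem.Str.join "" (x :: xs) = x ++ PySem.Str.join "" xs := by
  cases xs with
  | nil => rw [join_single, join_empty, String.append_empty]
  | cons y r => rw [join_cons]; simp [String.append_empty]

theorem join0_append (xs ys : List String) :
    PySem.Str.join "" (xs ++ ys) = PySem.Str.join "" xs ++ PySem.Str.join "" ys := by
  induction xs with
  | nil => rw [join_empty]; simp [String.empty_append]
  | cons x r ih => simp only [List.cons_append, join0_cons, ih, String.append_assoc]

-- A's hyphen helper is "-".join
theorem hyph_aux (N : Int) : ∀ (s : List String) (k : Int) (acc : String), k + s.length = N →
    (PySem.List.enumerate s k).foldl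
      (fun str1 p => if (N - 1 ≠ p.1) then str1 ++ p.2 ++ "-" else str1 ++ p.2) acc
      = acc ++ PySem.Str.join "-" s := by
  intro s
  induction s with
  | nil => intro k acc _; simp [PySem.List.enumerate_nil, join_empty, String.append_empty]
  | cons x xs ih =>
    intro k acc hN
    rw [PySem.List.enumerate_cons]
    simp only [List.foldl_cons]
    cases xs with
    | nil =>
      have hc : ¬ (N - 1 ≠ k) := by simp at hN ⊢; omega
      rw [if_neg hc]
      simp [PySem.List.enumerate_nil, join_single]
    | cons y r =>
      have hc : (N - 1 ≠ k) := by
        simp only [List.length_cons] at hN; push_cast at hN; omega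
      rw [if_pos hc, ih (k + 1) _ (by simp at hN ⊢; omega)]
      rw [join_cons]
      simp [String.append_assoc]

theorem hyph_eq (s : List String) : list_to_hyphen_string s = PySem.Str.join "-" s := by
  rw [list_to_hyphen_string, hyph_aux (s.length : Int) s 0 "" (by omega)]
  rw [String.empty_append]

-- A's loop, described by Core
theorem A_aux (L : List String) : ∀ (rest : List String) (k si : Nat) (p : String),
    rest = L.drop k → si ≤ k → (rest = [] → si = k) →
    ((PySem.List.enumerate rest (k : Int)).foldl (stepA L) ((si : Int), p)).2
      = p ++ Core rest ((L.drop si).take (k - si)) := by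
  intro rest
  induction rest with
  | nil =>
    intro k si p _ _ hsi
    rw [hsi rfl]
    simp [PySem.List.enumerate_nil, Core, join_empty, String.append_empty]
  | cons t ts ih =>
    intro k si p hdrop hle hnil
    have hts : ts = L.drop (k + 1) := by
      rw [← List.tail_drop, ← hdrop]
      rfl
    have htk : L[k]? = some t := by
      have h := congrArg (fun l => l[0]?) hdrop
      simpa [List.getElem?_drop] using h.symm
    rw [PySem.List.enumerate_cons]
    simp only [List.foldl_cons, Core]
    by_cases hop : (PySem.Dict.keys operators).contains t = true
    · rw [stepA, if_pos hop]
      simp only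
      have hslice : PySem.List.slice L (some (si : Int)) (some (k : Int))
          = (L.drop si).take (k - si) := PySem.List.slice_natCast L si k
      have : ((k : Int) + 1) = ((k + 1 : Nat) : Int) := by push_cast; ring
      rw [this, ih (k + 1) (k + 1) _ hts (le_refl _) (fun _ => rfl)]
      rw [hslice, hyph_eq, if_pos hop]
      simp [String.append_assoc]
    · rw [stepA, if_neg hop]
      simp only
      rw [if_neg hop]
      have hgrp : (L.drop si).take (k + 1 - si) = (L.drop si).take (k - si) ++ [t] := by
        have h1 : k + 1 - si = (k - si) + 1 := by omega
        rw [h1, List.take_add_one]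
        have : (L.drop si)[k - si]? = some t := by
          rw [List.getElem?_drop]
          have : si + (k - si) = k := by omega
          rw [this, htk]
        rw [this]; rfl
      cases ts with
      | nil =>
        have hlen : L.length = k + 1 := by
          have h1 : L.length - k = 1 := by
            have := congrArg List.length hdrop
            simp [List.length_drop] at this
            omega
          have h2 : k < L.length := by
            by_contra hc
            rw [List.getElem?_eq_none (by omega)] at htk
            simp at htk
          omega
        rw [if_pos (by omega)]
        simp only [PySem.List.enumerate_nil, List.foldl_nil]
        rw [PySem.List.slice_from_natCast, hyph_eq, Core]
        have hdl : (L.drop si).take (k + 1 - si) = L.drop si := by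
          rw [List.take_of_length_le]
          simp [List.length_drop]; omega
        rw [← hgrp, hdl]
      | cons t' ts' =>
        have hlen : ¬ ((L.length : Int) = (k : Int) + 1) := by
          have := congrArg List.length hdrop
          simp [List.length_drop] at this
          omega
        rw [if_neg hlen]
        have : ((k : Int) + 1) = ((k + 1 : Nat) : Int) := by push_cast; ring
        rw [this, ih (k + 1) si p (by rw [hts]) (by omega) (by simp)]
        rw [hgrp]

-- B's loop, described by Core
theorem B_aux : ∀ (ts : List String) (pieces g : List String),
    PySem.Str.join "" ((ts.foldl stepB (pieces, g)).1 ++ [PySem.Str.join "-" (ts.foldl stepB (pieces, g)).2])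
      = PySem.Str.join "" pieces ++ Core ts g := by
  intro ts
  induction ts with
  | nil =>
    intro pieces g
    simp only [List.foldl_nil, Core]
    rw [join0_append, join_single]
  | cons t r ih =>
    intro pieces g
    simp only [List.foldl_cons, Core, stepB]
    by_cases hop : (PySem.Dict.keys operators).contains t = true
    · rw [if_pos hop, if_pos hop]
      rw [ih, join0_append, join_single]
      simp [String.append_assoc]
    · rw [if_neg hop, if_neg hop]
      rw [ih]

-- ===== VERDICT (by name: the statement is the Claim_ definition above) =====
theorem preprocessed_spec : Claim_equal_preprocessed := by
  intro input_equation _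
  unfold Spec_preprocessed preprocessed preprocessed_alt
  have hA := A_aux (PySem.Str.split₀ input_equation) (PySem.Str.split₀ input_equation) 0 0 ""
      (by simp) (le_refl _) (fun _ => rfl)
  simp only [Nat.cast_zero, Nat.sub_zero, List.drop_zero, List.take_zero] at hA
  have hB := B_aux (PySem.Str.split₀ input_equation) [] []
  rw [hA, hB, join_empty, String.empty_append]
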